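-- pv_equiv track=rewrite | github.com/University-for-the-Creative-Arts/Greedy_Piggies | Content/Tools/generate_report.py | rebuild_markdown
-- ===== SOURCE A (Python) =====
-- def build_issue_table(rows: list[dict]) -> list[str]:
--     lines = ["| Asset Name | Content Path | Issue |", "|---|---|---|"]
--     for r in rows:
--         lines.append(f"| `{r['name']}` | `{r['path']}` | {r['issue']} |")
--     return lines
--
-- def rebuild_markdown(rows: list[dict], header_block: str, png_filename: str) -> str:
--     """
--     Reconstruct scan_results.md cleanly each time:
--       header_block  -- preserved from original (scan timestamp + summary counts)
--       ## Graphs     -- embedded chart image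
--       ## Triangle Count Issues
--       ## Texture Size Issues
--       ## LOD Issues
--       ## Asset File Size Issues
--     """
--     meshes   = [r for r in rows if r["type"] == "MESH"]
--     textures = [r for r in rows if r["type"] == "TEXTURE"]
--     lods     = [r for r in rows if r["type"] == "LOD"]
--     sizes    = [r for r in rows if r["type"] == "SIZE"]
--
--     lines = [header_block.rstrip("\n")]
--     lines.append("\n## Graphs\n")
--     lines.append(f"![Issue Breakdown]({png_filename})\n")
--
--     for section_name, section_rows in [
--         ("Triangle Count Issues", meshes),
--         ("Texture Size Issues",   textures),
--         ("LOD Issues",            lods),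
--         ("Asset File Size Issues", sizes),
--     ]:
--         if section_rows:
--             lines.append("\n---\n")
--             lines.append(f"## {section_name}\n")
--             lines.extend(build_issue_table(section_rows))
--
--     lines.append("\n---\n")
--     return "\n".join(lines)
-- ===== SOURCE B (Python) =====
-- def rebuild_markdown(rows: list[dict], header_block: str, png_filename: str) -> str:
--     # One grouping pass over rows (type -> rows in encounter order) replaces
--     # four independent filtering scans; table lines built inline by comprehension.
--     groups = {}
--     for r in rows:
--         groups.setdefault(r["type"], []).append(r)
--
--     lines = [header_block.rstrip("\n"),
--              "\n## Graphs\n",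
--              f"![Issue Breakdown]({png_filename})\n"]
--
--     for section_name, key in [("Triangle Count Issues", "MESH"),
--                               ("Texture Size Issues",   "TEXTURE"),
--                               ("LOD Issues",            "LOD"),
--                               ("Asset File Size Issues", "SIZE")]:
--         grp = groups.get(key, [])
--         if grp:
--             lines += ["\n---\n",
--                       f"## {section_name}\n",
--                       "| Asset Name | Content Path | Issue |",
--                       "|---|---|---|"]
--             lines += [f"| `{r['name']}` | `{r['path']}` | {r['issue']} |" for r in grp]
--
--     lines.append("\n---\n")
--     return "\n".join(lines)
-- ===== Notes on version B (the rewrite author's own statement) =====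
-- stated objective: alternative
-- what changed: Replaced A's four independent list-comprehension scans of rows (one per issue type) by a single grouping pass building a dict type->rows, then a loop over the fixed (section, key) pairs reading each group; the per-row table helper becomes an inline comprehension.
import Mathlib
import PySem

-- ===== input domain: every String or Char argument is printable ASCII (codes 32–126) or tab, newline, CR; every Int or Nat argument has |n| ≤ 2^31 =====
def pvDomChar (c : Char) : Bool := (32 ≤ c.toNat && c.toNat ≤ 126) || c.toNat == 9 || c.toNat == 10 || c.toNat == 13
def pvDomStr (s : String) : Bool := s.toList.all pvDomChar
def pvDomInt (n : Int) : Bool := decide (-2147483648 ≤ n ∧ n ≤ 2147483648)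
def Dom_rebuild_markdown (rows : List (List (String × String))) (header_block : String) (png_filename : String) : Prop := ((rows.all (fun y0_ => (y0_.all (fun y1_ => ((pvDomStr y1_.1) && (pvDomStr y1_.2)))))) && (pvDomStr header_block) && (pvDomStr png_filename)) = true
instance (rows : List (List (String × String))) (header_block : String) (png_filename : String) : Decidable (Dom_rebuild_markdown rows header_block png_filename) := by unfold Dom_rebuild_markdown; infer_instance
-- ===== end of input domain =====

-- B groups rows by type in one pass (dict type -> rows) instead of A's four filtering scans; equal output proved on Pre_.

-- shared: Python dict lookup r[k] on an association list (first match); some v iff the key is present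
def rowGet? (r : List (String × String)) (k : String) : Option String :=
  (r.find? (fun p => p.1 == k)).map (·.2)

-- r[k] under Pre_ (the key is present wherever either Python evaluates it)
def rowGet (r : List (String × String)) (k : String) : String :=
  (rowGet? r k).getD ""

-- exact hand port of s.rstrip("\n"): drop trailing newline characters
def rstripNl (s : String) : String :=
  String.mk ((s.toList.reverse.dropWhile (fun c => c == '\n')).reverse)

-- ===== PORT A =====
-- port of build_issue_table: a loop appending one table line per row
def build_issue_table (rows : List (List (String × String))) : List String :=
  rows.foldl
    (fun lines r =>
      lines ++ ["| `" ++ rowGet r "name" ++ "` | `" ++ rowGet r "path" ++ "` | " ++ rowGet r "issue" ++ " |"])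
    ["| Asset Name | Content Path | Issue |", "|---|---|---|"]

def rebuild_markdown (rows : List (List (String × String))) (header_block : String) (png_filename : String) : String :=
  let meshes   := rows.filter (fun r => rowGet r "type" == "MESH")
  let textures := rows.filter (fun r => rowGet r "type" == "TEXTURE")
  let lods     := rows.filter (fun r => rowGet r "type" == "LOD")
  let sizes    := rows.filter (fun r => rowGet r "type" == "SIZE")
  let lines := [rstripNl header_block]
  let lines := lines ++ ["\n## Graphs\n"]
  let lines := lines ++ ["![Issue Breakdown](" ++ png_filename ++ ")\n"]
  let lines :=
    [("Triangle Count Issues", meshes), ("Texture Size Issues", textures),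
     ("LOD Issues", lods), ("Asset File Size Issues", sizes)].foldl
      (fun lines sec =>
        if sec.2.isEmpty then lines
        else (lines ++ ["\n---\n"] ++ ["## " ++ sec.1 ++ "\n"]) ++ build_issue_table sec.2)
      lines
  let lines := lines ++ ["\n---\n"]
  PySem.Str.join "\n" lines

-- ===== PORT B =====
-- one table line for a row (the body of Source B's comprehension)
def rowLine (r : List (String × String)) : String :=
  "| `" ++ rowGet r "name" ++ "` | `" ++ rowGet r "path" ++ "` | " ++ rowGet r "issue" ++ " |"

def rebuild_markdown_alt (rows : List (List (String × String))) (header_block : String) (png_filename : String) : String :=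
  let groups : PySem.Dict String (List (List (String × String))) :=
    rows.foldl (fun d r => d.modify (rowGet r "type") [] (· ++ [r])) PySem.Dict.empty
  let lines := [rstripNl header_block, "\n## Graphs\n",
                "![Issue Breakdown](" ++ png_filename ++ ")\n"]
  let lines :=
    [("Triangle Count Issues", "MESH"), ("Texture Size Issues", "TEXTURE"),
     ("LOD Issues", "LOD"), ("Asset File Size Issues", "SIZE")].foldl
      (fun lines sec =>
        let grp := groups.getD sec.2 []
        if grp.isEmpty then lines
        else lines ++ ["\n---\n", "## " ++ sec.1 ++ "\n",
                       "| Asset Name | Content Path | Issue |", "|---|---|---|"] ++ grp.map rowLine)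
      lines
  PySem.Str.join "\n" (lines ++ ["\n---\n"])

-- ===== PRECONDITION & SPEC =====
-- the association list r has an entry for key k
def hasKey (r : List (String × String)) (k : String) : Prop := ∃ p ∈ r, p.1 = k

-- the FIRST "type" entry of r (Python dict lookup = first match) carries the value t
def firstTypeIs (r : List (String × String)) (t : String) : Prop :=
  ∃ i : Fin r.length, (r[i]).1 = "type" ∧ (r[i]).2 = t ∧
    ∀ j : Fin r.length, j < i → (r[j]).1 ≠ "type"

-- Pre_ excludes exactly the inputs where the Python raises KeyError: a row without a "type" key,
-- or a row of one of the four reported types missing "name"/"path"/"issue".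
def Pre_rebuild_markdown (rows : List (List (String × String))) (header_block : String) (png_filename : String) : Prop :=
  ∀ r ∈ rows, hasKey r "type" ∧
    ((firstTypeIs r "MESH" ∨ firstTypeIs r "TEXTURE" ∨ firstTypeIs r "LOD" ∨ firstTypeIs r "SIZE") →
      hasKey r "name" ∧ hasKey r "path" ∧ hasKey r "issue")
instance (rows : List (List (String × String))) (header_block : String) (png_filename : String) : Decidable (Pre_rebuild_markdown rows header_block png_filename) := by unfold Pre_rebuild_markdown hasKey firstTypeIs; infer_instance

def pvWitness_rebuild_markdown : (List (List (String × String))) × String × String :=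
  ([[("type", "MESH"), ("name", "a"), ("path", "p"), ("issue", "big")], [("type", "OTHER")]],
   "# Scan\n", "chart.png")

def Spec_rebuild_markdown (rows : List (List (String × String))) (header_block : String) (png_filename : String) (out : String) : Prop := out = rebuild_markdown_alt rows header_block png_filename
instance (rows : List (List (String × String))) (header_block : String) (png_filename : String) (out : String) : Decidable (Spec_rebuild_markdown rows header_block png_filename out) := by unfold Spec_rebuild_markdown; infer_instance

-- ===== CLAIM (what is proved, stated in full; the proofs are below) =====
def Claim_equal_rebuild_markdown : Prop := ∀ (rows : List (List (String × String))) (header_block : String) (png_filename : String), Dom_rebuild_markdown rows header_block png_filename → Pre_rebuild_markdown rows header_block png_filename → Spec_rebuild_markdown rows header_block png_filename (rebuild_markdown rows header_block png_filename)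

-- ===== LEMMAS AND PROOFS =====

-- B's grouping dict read at key k is exactly A's filter of rows by type k
theorem groups_getD (rows : List (List (String × String))) (k : String) :
    (rows.foldl (fun d r => d.modify (rowGet r "type") [] (· ++ [r])) PySem.Dict.empty).getD k []
      = rows.filter (fun r => rowGet r "type" == k) := by
  have h : rows.foldl (fun d r => d.modify (rowGet r "type") [] (· ++ [r])) PySem.Dict.empty
      = (rows.map (fun r => (rowGet r "type", r))).foldl
          (fun d p => d.modify p.1 [] (· ++ [p.2])) PySem.Dict.empty := by
    rw [List.foldl_map]
  rw [h, PySem.Dict.getD_foldl_modify_append]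
  simp [List.filter_map, Function.comp_def]

-- A's table loop equals header lines plus a map
theorem build_issue_table_eq (rows : List (List (String × String))) :
    build_issue_table rows
      = ["| Asset Name | Content Path | Issue |", "|---|---|---|"] ++ rows.map rowLine := by
  unfold build_issue_table rowLine
  generalize ["| Asset Name | Content Path | Issue |", "|---|---|---|"] = init
  induction rows generalizing init with
  | nil => simp
  | cons r rest ih => simp [List.foldl_cons, ih]

-- ===== VERDICT (by name: the statement is the Claim_ definition above) =====
theorem rebuild_markdown_spec : Claim_equal_rebuild_markdown := by
  intro rows header_block png_filename _ _
  show _ = _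
  unfold rebuild_markdown rebuild_markdown_alt
  simp only [groups_getD, build_issue_table_eq, List.foldl_cons, List.foldl_nil,
    List.append_assoc, List.cons_append, List.nil_append]
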